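-- pv_equiv track=rewrite | github.com/ShawnFrost23/COMP9318-21T1 | Lab3_specs/submission.py | processTrainData
-- ===== SOURCE A (Python) =====
-- def processTrainData(training_data):
--
--     vocabulary = set([])
--
--     spamDictionary = {}
--     lengthSpamDict = 0
--     totalSpamMessages = 0
--
--     hamDictionary = {}
--     lengthHamDict = 0
--     totalHamMessages = 0
--
--     for (dict, category) in training_data:
--
--         for key in dict:
--             vocabulary.add(key)
--
--         if category == 'spam':
--             totalSpamMessages += 1
--
--             for key, value in dict.items():
--
--                 lengthSpamDict += value
--
--                 if key not in spamDictionary: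
--                     spamDictionary[key] = value
--                 else:
--                     spamDictionary[key] += value
--
--
--         elif category == 'ham':
--             totalHamMessages += 1
--
--             for key, value in dict.items():
--
--                 lengthHamDict += value
--
--                 if key not in hamDictionary:
--                     hamDictionary[key] = value
--                 else:
--                     hamDictionary[key] += value
--
--     return spamDictionary, lengthSpamDict, totalSpamMessages, hamDictionary, lengthHamDict, totalHamMessages, vocabulary, len(vocabulary)
-- ===== SOURCE B (Python) =====
-- def processTrainData(training_data):
--     spam = [d for d, c in training_data if c == 'spam']
--     ham = [d for d, c in training_data if c == 'ham']
--
--     def merge(dicts):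
--         total = {}
--         for d in dicts:
--             for k, v in d.items():
--                 total[k] = total.get(k, 0) + v
--         return total
--
--     vocabulary = {k for d, _ in training_data for k in d}
--     return (merge(spam), sum(sum(d.values()) for d in spam), len(spam),
--             merge(ham), sum(sum(d.values()) for d in ham), len(ham),
--             vocabulary, len(vocabulary))
-- ===== Notes on version B (the rewrite author's own statement) =====
-- stated objective: simpler
-- what changed: Replaces the single interleaved loop with seven accumulators by category-grouped aggregation: partition the data into spam/ham buckets, fold each bucket's dicts into one total dict with a shared merge helper, take counts as bucket lengths and lengths as sums over the bucket, and build the vocabulary as one set comprehension over all keys.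
import Mathlib
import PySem

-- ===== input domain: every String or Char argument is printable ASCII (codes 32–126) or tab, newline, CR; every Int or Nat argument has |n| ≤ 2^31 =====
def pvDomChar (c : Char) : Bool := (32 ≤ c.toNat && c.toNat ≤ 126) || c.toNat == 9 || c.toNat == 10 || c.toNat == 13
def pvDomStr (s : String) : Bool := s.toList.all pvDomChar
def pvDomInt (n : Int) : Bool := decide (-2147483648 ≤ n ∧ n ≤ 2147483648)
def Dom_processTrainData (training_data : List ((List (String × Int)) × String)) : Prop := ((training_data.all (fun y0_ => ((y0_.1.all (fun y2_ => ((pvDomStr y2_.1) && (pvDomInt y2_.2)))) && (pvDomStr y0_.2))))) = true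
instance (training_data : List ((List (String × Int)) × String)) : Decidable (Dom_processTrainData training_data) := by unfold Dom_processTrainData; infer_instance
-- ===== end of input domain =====

-- B replaces A's single interleaved seven-accumulator loop by partitioning into category
-- buckets and aggregating each bucket separately (simpler decomposition, same cost).

-- ===== PORT A =====
-- state: (vocabulary, spamDict, lengthSpamDict, totalSpamMessages, hamDict, lengthHamDict, totalHamMessages)
def pvStateA := PySem.Set String × PySem.Dict String Int × Int × Int × PySem.Dict String Int × Int × Int

-- A's inner 'for key, value in dict.items()' body for one bucket: length += value; dict update
def pvInnerA (p : Int × PySem.Dict String Int) (kv : String × Int) : Int × PySem.Dict String Int :=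
  (p.1 + kv.2,
   if ¬ p.2.contains kv.1 then p.2.insert kv.1 kv.2
   else p.2.insert kv.1 (p.2.getD kv.1 0 + kv.2))

def pvStepA (s : pvStateA) (e : (List (String × Int)) × String) : pvStateA :=
  let voc := e.1.foldl (fun v kv => PySem.Set.add v kv.1) s.1
  if e.2 == "spam" then
    let p := e.1.foldl pvInnerA (s.2.2.1, s.2.1)
    (voc, p.2, p.1, s.2.2.2.1 + 1, s.2.2.2.2.1, s.2.2.2.2.2.1, s.2.2.2.2.2.2)
  else if e.2 == "ham" then
    let p := e.1.foldl pvInnerA (s.2.2.2.2.2.1, s.2.2.2.2.1)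
    (voc, s.2.1, s.2.2.1, s.2.2.2.1, p.2, p.1, s.2.2.2.2.2.2 + 1)
  else
    (voc, s.2.1, s.2.2.1, s.2.2.2.1, s.2.2.2.2.1, s.2.2.2.2.2.1, s.2.2.2.2.2.2)

def processTrainData (training_data : List ((List (String × Int)) × String)) : (List (String × Int)) × Int × Int × (List (String × Int)) × Int × Int × List String × Int :=
  let s := training_data.foldl pvStepA (PySem.Set.empty, PySem.Dict.empty, 0, 0, PySem.Dict.empty, 0, 0)
  (s.2.1.items, s.2.2.1, s.2.2.2.1, s.2.2.2.2.1.items, s.2.2.2.2.2.1, s.2.2.2.2.2.2, s.1, (PySem.Set.len s.1 : Int))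

-- ===== PORT B =====
-- total[k] = total.get(k, 0) + v, folded over each dict of the bucket
def pvMerge (ds : List (List (String × Int))) : PySem.Dict String Int :=
  ds.foldl (fun tot d => d.foldl (fun t kv => t.insert kv.1 (t.getD kv.1 0 + kv.2)) tot) PySem.Dict.empty

def processTrainData_alt (training_data : List ((List (String × Int)) × String)) : (List (String × Int)) × Int × Int × (List (String × Int)) × Int × Int × List String × Int :=
  let spam := (training_data.filter (fun e => e.2 == "spam")).map (·.1)
  let ham := (training_data.filter (fun e => !(e.2 == "spam") && e.2 == "ham")).map (·.1)
  let vocabulary := PySem.Set.ofList (training_data.flatMap (fun e => e.1.map (·.1)))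
  ((pvMerge spam).items, (spam.map (fun d => (d.map (·.2)).sum)).sum, (spam.length : Int),
   (pvMerge ham).items, (ham.map (fun d => (d.map (·.2)).sum)).sum, (ham.length : Int),
   vocabulary, (PySem.Set.len vocabulary : Int))

-- ===== PRECONDITION & SPEC =====
def Spec_processTrainData (training_data : List ((List (String × Int)) × String)) (out : (List (String × Int)) × Int × Int × (List (String × Int)) × Int × Int × List String × Int) : Prop := out = processTrainData_alt training_data
instance (training_data : List ((List (String × Int)) × String)) (out : (List (String × Int)) × Int × Int × (List (String × Int)) × Int × Int × List String × Int) : Decidable (Spec_processTrainData training_data out) := by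
  unfold Spec_processTrainData
  exact @instDecidableEqProd _ _ inferInstance
    (@instDecidableEqProd _ _ inferInstance
      (@instDecidableEqProd _ _ inferInstance inferInstance)) out _

-- ===== CLAIM (what is proved, stated in full; the proofs are below) =====
def Claim_equal_processTrainData : Prop := ∀ (training_data : List ((List (String × Int)) × String)), Dom_processTrainData training_data → Spec_processTrainData training_data (processTrainData training_data)

-- ===== LEMMAS AND PROOFS =====

-- A's branchy dict-update step equals B's unconditional get-default step
theorem pvInner_step_eq (t : PySem.Dict String Int) (kv : String × Int) :
    (if ¬ t.contains kv.1 then t.insert kv.1 kv.2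
     else t.insert kv.1 (t.getD kv.1 0 + kv.2)) =
    t.insert kv.1 (t.getD kv.1 0 + kv.2) := by
  by_cases h : t.contains kv.1
  · simp [h]
  · simp [h, PySem.Dict.getD_of_not_contains t 0 (by simpa using h)]

-- A's paired inner fold splits into the value-sum and B's dict fold
theorem pvInnerA_split (m : List (String × Int)) (l : Int) (d : PySem.Dict String Int) :
    m.foldl pvInnerA (l, d) =
      (l + (m.map (·.2)).sum,
       m.foldl (fun t kv => t.insert kv.1 (t.getD kv.1 0 + kv.2)) d) := by
  induction m generalizing l d with
  | nil => simp
  | cons kv rest ih =>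
    simp only [List.foldl_cons, List.map_cons, List.sum_cons, pvInnerA]
    rw [pvInner_step_eq, ih]
    simp only [Prod.mk.injEq, and_true]
    ring

-- the full loop of A, from an arbitrary state, in terms of B's bucketed aggregates
theorem pvLoopA_char (td : List ((List (String × Int)) × String)) (s : pvStateA) :
    td.foldl pvStepA s =
      (PySem.Set.update s.1 (td.flatMap (fun e => e.1.map (·.1))),
       ((td.filter (fun e => e.2 == "spam")).map (·.1)).foldl
         (fun tot d => d.foldl (fun t kv => t.insert kv.1 (t.getD kv.1 0 + kv.2)) tot) s.2.1,
       s.2.2.1 + (((td.filter (fun e => e.2 == "spam")).map (·.1)).map (fun d => (d.map (·.2)).sum)).sum,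
       s.2.2.2.1 + ((td.filter (fun e => e.2 == "spam")).length : Int),
       ((td.filter (fun e => !(e.2 == "spam") && e.2 == "ham")).map (·.1)).foldl
         (fun tot d => d.foldl (fun t kv => t.insert kv.1 (t.getD kv.1 0 + kv.2)) tot) s.2.2.2.2.1,
       s.2.2.2.2.2.1 + (((td.filter (fun e => !(e.2 == "spam") && e.2 == "ham")).map (·.1)).map (fun d => (d.map (·.2)).sum)).sum,
       s.2.2.2.2.2.2 + ((td.filter (fun e => !(e.2 == "spam") && e.2 == "ham")).length : Int)) := by
  induction td generalizing s with
  | nil => simp [PySem.Set.update_nil]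
  | cons e rest ih =>
    simp only [List.foldl_cons, List.flatMap_cons, List.filter_cons]
    rw [PySem.Set.update_append]
    by_cases hs : e.2 = "spam"
    · have hsb : (e.2 == "spam") = true := by simp [hs]
      simp only [pvStepA, hsb, if_true]
      rw [pvInnerA_split, ih]
      simp [PySem.Set.update_map_eq_foldl_add]
      ring_nf
    · have hsb : (e.2 == "spam") = false := by simp [hs]
      by_cases hh : e.2 = "ham"
      · have hhb : (e.2 == "ham") = true := by simp [hh]
        simp only [pvStepA, hsb, hhb, Bool.false_eq_true, if_false, if_true]
        rw [pvInnerA_split, ih]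
        simp [PySem.Set.update_map_eq_foldl_add]
        ring_nf
      · have hhb : (e.2 == "ham") = false := by simp [hh]
        simp only [pvStepA, hsb, hhb, Bool.false_eq_true, if_false]
        rw [ih]
        simp [PySem.Set.update_map_eq_foldl_add]

-- ===== VERDICT (by name: the statement is the Claim_ definition above) =====
theorem processTrainData_spec : Claim_equal_processTrainData := by
  intro td _
  unfold Spec_processTrainData processTrainData processTrainData_alt pvMerge
  rw [pvLoopA_char]
  simp [PySem.Set.update_nil_left]
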